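-- pv_equiv track=rewrite | github.com/devp4/PyApiReference | PyAPIReference/extra.py | convert_to_code_block
-- ===== SOURCE A (Python) =====
-- TAB = "&nbsp;" * 4
--
-- def convert_to_code_block(string: str) -> str:
-- 	if not hasattr(string, '__iter__'):
-- 		return
--
-- 	result = ""
-- 	if "\n" in string:
-- 		for line in string.split("\n"):
-- 			result += convert_to_code_block(line) + "<br>"
--
-- 		return result
--
-- 	result += "<span style='background-color: #404040; color: white;'>"
-- 	result += str(string).replace("\t", TAB)
-- 	result += "</span>"
--
-- 	return result
-- ===== SOURCE B (Python) =====
-- TAB = "&nbsp;" * 4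
-- SPAN_OPEN = "<span style='background-color: #404040; color: white;'>"
--
-- def convert_to_code_block(string: str) -> str:
-- 	if not hasattr(string, '__iter__'):
-- 		return
--
-- 	wrapped = [SPAN_OPEN + line.replace("\t", TAB) + "</span>" for line in string.split("\n")]
-- 	if len(wrapped) == 1:
-- 		return wrapped[0]
-- 	return "<br>".join(wrapped) + "<br>"
-- ===== Notes on version B (the rewrite author's own statement) =====
-- stated objective: simpler
-- what changed: Replaces the self-recursive per-line wrapping with a flat list comprehension over the newline-split lines plus a single join on the break tag, so the function never calls itself.
import Mathlib
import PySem

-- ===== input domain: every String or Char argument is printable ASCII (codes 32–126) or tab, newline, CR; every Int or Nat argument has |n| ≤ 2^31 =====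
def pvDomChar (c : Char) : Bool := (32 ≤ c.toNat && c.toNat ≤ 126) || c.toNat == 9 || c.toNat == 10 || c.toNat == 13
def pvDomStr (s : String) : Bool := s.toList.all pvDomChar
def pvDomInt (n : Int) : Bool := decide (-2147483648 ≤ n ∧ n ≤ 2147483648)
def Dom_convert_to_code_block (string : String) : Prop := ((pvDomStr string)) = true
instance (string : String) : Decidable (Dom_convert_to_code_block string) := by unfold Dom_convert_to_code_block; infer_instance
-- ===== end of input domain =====

-- B flattens A's one-level recursion: a list comprehension over the newline-split lines plus a single join on the break tag; same output, no self-call.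


-- ===== PORT A =====
-- termination helper (cited by the port's decreasing_by): every piece of a split
-- of a string that contains '\n' is strictly shorter than the string.
def pvGo (c : Char) : List Char → List Char → List (List Char)
  | [], cur => [cur.reverse]
  | a :: rest, cur => if a = c then cur.reverse :: pvGo c rest [] else pvGo c rest (a :: cur)

theorem pvGo_eq_go (c : Char) : ∀ (fuel : Nat) (l cur : List Char) (acc : List (List Char)) (_ : l.length < fuel),
    PySem.Chars.splitOn.go [c] fuel l cur acc = acc.reverse ++ pvGo c l cur := by
  intro fuel
  induction fuel with
  | zero => intro l cur acc h; omega
  | succ n ih =>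
    intro l cur acc h
    cases l with
    | nil => simp [PySem.Chars.splitOn.go, pvGo]
    | cons a rest =>
      rw [PySem.Chars.splitOn.go]
      by_cases hac : a = c
      · subst hac
        simp only [List.isPrefixOf, beq_self_eq_true, Bool.true_and, if_pos,
          List.length_cons, List.length_nil, Nat.zero_add, List.drop_succ_cons, List.drop_zero]
        rw [ih rest [] (cur.reverse :: acc) (by simpa using Nat.lt_of_succ_lt_succ h)]
        simp [pvGo]
      · have hba : (c == a) = false := by simp [Ne.symm hac]
        simp only [List.isPrefixOf, hba, Bool.false_and, if_neg, Bool.false_eq_true,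
          not_false_iff]
        rw [ih rest (a :: cur) acc (by simpa using Nat.lt_of_succ_lt_succ h)]
        simp [pvGo, hac]

theorem splitOn_single (c : Char) (s : List Char) :
    PySem.Chars.splitOn s [c] = pvGo c s [] := by
  unfold PySem.Chars.splitOn
  simpa using pvGo_eq_go c (s.length + 1) s [] [] (Nat.lt_succ_self _)

theorem pvGo_piece_len (c : Char) : ∀ (l cur p : List Char), p ∈ pvGo c l cur →
    p.length + l.count c ≤ cur.length + l.length := by
  intro l
  induction l with
  | nil => intro cur p hp; simp [pvGo] at hp; simp [hp]
  | cons a rest ih =>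
    intro cur p hp
    by_cases hac : a = c
    · subst hac
      simp [pvGo] at hp ⊢
      rcases hp with hp | hp
      · have := List.count_le_length (l := rest) (a := a); simp [hp]; omega
      · have := ih [] p hp; simp at this; omega
    · simp [pvGo, hac] at hp ⊢
      have := ih (a :: cur) p hp; simp at this; omega

def convert_to_code_block (string : String) : String :=
  if PySem.Str.isIn "\n" string then
    (((PySem.Chars.splitOn string.toList "\n".toList).map String.ofList).attach.foldl
      (fun result line => result ++ (convert_to_code_block line.1 ++ "<br>")) "")
  else
    "" ++ "<span style='background-color: #404040; color: white;'>"
      ++ PySem.Str.replace string "\t" "&nbsp;&nbsp;&nbsp;&nbsp;" ++ "</span>"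
termination_by string.toList.length
decreasing_by
  rename_i hin
  obtain ⟨p, hp, hpl⟩ := List.mem_map.mp line.2
  have hlen := pvGo_piece_len '\n' string.toList [] p (by
    rwa [show ("\n" : String).toList = ['\n'] from rfl, splitOn_single] at hp)
  have hmem : '\n' ∈ string.toList := by
    have := (PySem.Str.isIn_iff_infix (sub := "\n") (s := string)).mp hin
    exact (List.singleton_infix_iff _ _).mp (by simpa using this)
  have hcnt : 1 ≤ string.toList.count '\n' := List.one_le_count_iff.mpr hmem
  have : line.1.toList = p := by rw [← hpl, String.toList_ofList]
  simp only [List.length_nil, Nat.zero_add] at hlen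
  simp only [this]
  omega

-- ===== PORT B =====
def convert_to_code_block_alt (string : String) : String :=
  let wrapped := ((PySem.Str.split? string "\n").getD []).map
    (fun line => "<span style='background-color: #404040; color: white;'>"
      ++ PySem.Str.replace line "\t" "&nbsp;&nbsp;&nbsp;&nbsp;" ++ "</span>")
  if wrapped.length = 1 then wrapped.getD 0 "" else PySem.Str.join "<br>" wrapped ++ "<br>"

-- ===== PRECONDITION & SPEC =====
def Spec_convert_to_code_block (string : String) (out : String) : Prop := out = convert_to_code_block_alt string
instance (string : String) (out : String) : Decidable (Spec_convert_to_code_block string out) := by unfold Spec_convert_to_code_block; infer_instance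

-- ===== CLAIM (what is proved, stated in full; the proofs are below) =====
def Claim_equal_convert_to_code_block : Prop := ∀ (string : String), Dom_convert_to_code_block string → Spec_convert_to_code_block string (convert_to_code_block string)

-- ===== LEMMAS AND PROOFS =====

theorem pvGo_no_sep_eq (c : Char) : ∀ (l cur : List Char), c ∉ l →
    pvGo c l cur = [cur.reverse ++ l] := by
  intro l
  induction l with
  | nil => intro cur _; simp [pvGo]
  | cons a rest ih =>
    intro cur h
    have hac : a ≠ c := fun e => h (by simp [e])
    have : pvGo c rest (a :: cur) = [(a :: cur).reverse ++ rest] := ih _ (fun hm => h (by simp [hm]))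
    simp [pvGo, hac, this]

theorem pvGo_pieces_no_sep (c : Char) : ∀ (l cur : List Char), c ∉ cur →
    ∀ p ∈ pvGo c l cur, c ∉ p := by
  intro l
  induction l with
  | nil => intro cur hc p hp; simp [pvGo] at hp; simpa [hp] using hc
  | cons a rest ih =>
    intro cur hc p hp
    by_cases hac : a = c
    · subst hac
      simp [pvGo] at hp
      rcases hp with hp | hp
      · simpa [hp] using hc
      · exact ih [] (by simp) p hp
    · simp [pvGo, hac] at hp
      exact ih (a :: cur) (by
        intro hm
        rcases List.mem_cons.mp hm with he | hm2
        · exact hac he.symm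
        · exact hc hm2) p hp

theorem pvGo_ne_nil (c : Char) : ∀ (l cur : List Char), pvGo c l cur ≠ [] := by
  intro l
  induction l with
  | nil => intro cur; simp [pvGo]
  | cons a rest ih =>
    intro cur
    by_cases hac : a = c
    · subst hac; simp [pvGo]
    · simpa [pvGo, hac] using ih (a :: cur)

theorem pvGo_len_two (c : Char) : ∀ (l cur : List Char), c ∈ l →
    2 ≤ (pvGo c l cur).length := by
  intro l
  induction l with
  | nil => intro cur h; simp at h
  | cons a rest ih =>
    intro cur h
    by_cases hac : a = c
    · subst hac
      have h1 : 1 ≤ (pvGo a rest []).length :=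
        List.length_pos_of_ne_nil (pvGo_ne_nil a rest [])
      simp [pvGo]
      omega
    · have hm : c ∈ rest := by
        rcases List.mem_cons.mp h with he | hm
        · exact absurd he.symm hac
        · exact hm
      simpa [pvGo, hac] using ih (a :: cur) hm

theorem pv_fold_join (w : String → String) : ∀ (L : List String) (pre : String), L ≠ [] →
    L.foldl (fun r x => r ++ (w x ++ "<br>")) pre
      = pre ++ (PySem.Str.join "<br>" (L.map w) ++ "<br>") := by
  intro L
  induction L with
  | nil => intro pre h; exact absurd rfl h
  | cons x xs ih =>
    intro pre _
    cases xs with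
    | nil =>
      apply String.toList_inj.mp
      simp [PySem.Str.toList_join, PySem.Chars.join_singleton]
    | cons y ys =>
      rw [List.foldl_cons, ih (pre ++ (w x ++ "<br>")) (by simp)]
      apply String.toList_inj.mp
      simp [PySem.Str.toList_join, PySem.Chars.join_cons_cons]

-- ===== VERDICT (by name: the statement is the Claim_ definition above) =====
theorem convert_to_code_block_spec : Claim_equal_convert_to_code_block := by
  intro s _
  unfold Spec_convert_to_code_block convert_to_code_block_alt
  rw [convert_to_code_block]
  have hsplit : (PySem.Str.split? s "\n").getD []
      = (PySem.Chars.splitOn s.toList ['\n']).map String.ofList := by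
    simp [PySem.Str.split?, PySem.Chars.split?]
  by_cases hin : PySem.Str.isIn "\n" s = true
  · have hmem : '\n' ∈ s.toList := by
      have := (PySem.Str.isIn_iff_infix "\n" s).mp hin
      exact (List.singleton_infix_iff '\n' s.toList).mp (by simpa using this)
    rw [if_pos hin]
    have hlen2 : 2 ≤ (PySem.Chars.splitOn s.toList ['\n']).length := by
      rw [splitOn_single]; exact pvGo_len_two '\n' s.toList [] hmem
    have hnil : (PySem.Chars.splitOn s.toList ['\n']).map String.ofList ≠ [] := by
      intro he
      rw [List.map_eq_nil_iff.mp he] at hlen2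
      simp at hlen2
    have hconv : ∀ x ∈ (PySem.Chars.splitOn s.toList ['\n']).map String.ofList,
        convert_to_code_block x
          = "<span style='background-color: #404040; color: white;'>"
            ++ PySem.Str.replace x "\t" "&nbsp;&nbsp;&nbsp;&nbsp;" ++ "</span>" := by
      intro x hx
      obtain ⟨p, hp, hpx⟩ := List.mem_map.mp hx
      have hnop : '\n' ∉ p := by
        rw [splitOn_single] at hp
        exact pvGo_pieces_no_sep '\n' s.toList [] (by simp) p hp
      have hxin : PySem.Chars.isIn ['\n'] x.toList = false := by
        rw [PySem.Chars.isIn_eq_false_iff]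
        intro hinf
        rw [← hpx, String.toList_ofList] at hinf
        exact hnop ((List.singleton_infix_iff '\n' p).mp hinf)
      rw [convert_to_code_block, if_neg (by simp [hxin]), String.empty_append]
    rw [List.foldl_attach
      (f := fun acc x => acc ++ (convert_to_code_block x ++ "<br>")) (b := "")]
    rw [PySem.List.foldl_congr_mem _ _
      (fun acc x => acc ++
        (("<span style='background-color: #404040; color: white;'>"
          ++ PySem.Str.replace x "\t" "&nbsp;&nbsp;&nbsp;&nbsp;" ++ "</span>") ++ "<br>")) _
      (fun acc x hx => by rw [hconv x hx])]
    rw [pv_fold_join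
      (fun x => "<span style='background-color: #404040; color: white;'>"
        ++ PySem.Str.replace x "\t" "&nbsp;&nbsp;&nbsp;&nbsp;" ++ "</span>")
      ((PySem.Chars.splitOn s.toList ("\n".toList)).map String.ofList) "" hnil,
      String.empty_append]
    have hcond : (PySem.Chars.splitOn s.toList ['\n']).length ≠ 1 := by omega
    simp only [hsplit]
    simp [hcond]
  · have hnm : '\n' ∉ s.toList := by
      intro hm
      exact hin ((PySem.Str.isIn_iff_infix "\n" s).mpr (by
        simpa using (List.singleton_infix_iff '\n' s.toList).mpr hm))
    have hparts : PySem.Chars.splitOn s.toList ['\n'] = [s.toList] := by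
      rw [splitOn_single, pvGo_no_sep_eq '\n' s.toList [] hnm]; simp
    rw [if_neg hin]
    simp [hsplit, hparts, String.ofList_toList]
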